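-- pv_equiv track=rewrite | github.com/sjkrieg/aoc2025 | day08/solve2.py | solve
-- ===== SOURCE A (Python) =====
-- def solve(coords: list[int]) -> int:
--     solution = 0
--     # distances - use dict instead of array for easier flattening
--     d = {}
--     # distance is symmetric so only populate d where i < j
--     for j in range(1, len(coords)):
--         for i in range(j):
--             d[(i, j)] = get_dist(coords[i], coords[j])
--
--     # sort by distance
--     sorted_pairs = sorted(d.items(), key=lambda x: x[1])
--
--     # instead of adjacency list, we want to keep a reachability list
--     reachable: dict[int, set[int]] = {i: {i} for i in range(len(coords))}
--     for (i, j), _ in sorted_pairs: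
--         reachable[i].update(reachable[j])
--         if len(reachable[i]) == len(coords):
--             return coords[i][0] * coords[j][0]
--         # we can even use the same object since they have the same neighborhoods
--         for v in reachable[i]:
--             reachable[v] = reachable[i]
--
-- def get_dist(p: list[int], q: list[int]) -> int:
--     return sum([(pi-qi)**2 for pi, qi in zip(p, q)])
-- ===== SOURCE B (Python) =====
-- def solve(coords: list[int]) -> int:
--     n = len(coords)
--     # build the edge list in the same (j outer, i inner) order A inserts into its dict
--     edges = []
--     for j in range(1, n):
--         for i in range(j):
--             dist = 0
--             for p, q in zip(coords[i], coords[j]):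
--                 dist += (p - q) ** 2
--             edges.append(((i, j), dist))
--     edges.sort(key=lambda e: e[1])  # stable, same tie order as A's sorted(d.items(), ...)
--     if n <= 1:
--         return None
--
--     def connected(k):
--         # stateless connectivity test of the k-edge prefix graph:
--         # saturate "reachable from vertex 0" until a pass changes nothing
--         seen = [v == 0 for v in range(n)]
--         for _ in range(n):
--             changed = False
--             for (i, j), _ in edges[:k]:
--                 if seen[i] != seen[j]:
--                     seen[i] = seen[j] = True
--                     changed = True
--             if not changed:
--                 break
--         return all(seen)
--
--     # connectivity of the prefix graph is monotone in k: binary search for the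
--     # minimal prefix that is connected; its last edge is the completing edge
--     lo, hi = 1, len(edges)
--     while lo < hi:
--         mid = (lo + hi) // 2
--         if connected(mid):
--             hi = mid
--         else:
--             lo = mid + 1
--     (i, j), _ = edges[lo - 1]
--     return coords[i][0] * coords[j][0]
-- ===== Notes on version B (the rewrite author's own statement) =====
-- stated objective: alternative
-- what changed: B replaces A's single greedy scan with shared per-vertex reachability sets by a binary search over the sorted edge list for the minimal prefix whose graph is connected, using a stateless fixed-point reachability test per probe; the last edge of that minimal prefix is the completing edge.
-- outside the precondition, e.g. on solve([[2], [0], [], [], [0, 3], [0, -1, -5]]): A returns 0, B returns 0; on solve([[], [1]]): A raises IndexError, B raises IndexError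
import Mathlib
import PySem

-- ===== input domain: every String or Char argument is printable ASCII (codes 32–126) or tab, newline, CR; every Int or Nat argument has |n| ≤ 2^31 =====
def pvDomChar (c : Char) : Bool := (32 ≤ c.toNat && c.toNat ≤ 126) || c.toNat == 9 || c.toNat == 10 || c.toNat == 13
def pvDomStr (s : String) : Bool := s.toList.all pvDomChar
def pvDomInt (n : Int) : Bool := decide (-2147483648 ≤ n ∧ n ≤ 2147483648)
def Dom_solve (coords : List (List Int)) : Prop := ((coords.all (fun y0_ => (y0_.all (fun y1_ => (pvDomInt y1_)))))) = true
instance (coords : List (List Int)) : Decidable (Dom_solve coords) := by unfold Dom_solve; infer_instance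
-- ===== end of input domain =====

-- B replaces A's greedy scan with shared reachability sets by a binary search over the
-- sorted edge list for the minimal connected prefix, with a stateless fixed-point
-- reachability test per probe: an alternative of similar cost.

-- ===== PORT A =====
def get_dist (p q : List Int) : Int :=
  ((p.zip q).map (fun pq => (pq.1 - pq.2) ^ 2)).sum

-- the 'for (i, j), _ in sorted_pairs' loop with its early return.
-- Python mutates reachable[i] in place ('update') and then re-points reachable[v] at that same
-- object for every v in the union; since every alias of the old objects is a member of the union
-- and gets reassigned, the net effect on the dict is exactly the insert-fold below.
def solveLoopA (coords : List (List Int)) (n : Int)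
    (reachable : PySem.Dict Int (PySem.Set Int)) :
    List ((Int × Int) × Int) → Option Int
  | [] => none
  | ((i, j), _) :: rest =>
    let s : PySem.Set Int :=
      PySem.Set.update (reachable.getD i PySem.Set.empty) (reachable.getD j PySem.Set.empty)
    if PySem.List.len s = n then
      some (PySem.List.pyGetD (PySem.List.pyGetD coords i []) 0 0 *
            PySem.List.pyGetD (PySem.List.pyGetD coords j []) 0 0)
    else
      solveLoopA coords n (s.foldl (fun r v => r.insert v s) reachable) rest

def solve (coords : List (List Int)) : Option Int :=
  let n : Int := PySem.List.len coords
  let d : PySem.Dict (Int × Int) Int :=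
    (PySem.List.pyRange 1 n 1).foldl (fun d j =>
      (PySem.List.pyRange 0 j 1).foldl (fun d i =>
        d.insert (i, j) (get_dist (PySem.List.pyGetD coords i []) (PySem.List.pyGetD coords j []))) d)
      PySem.Dict.empty
  let sorted_pairs := PySem.List.sorted d.items (fun x => x.2) false
  let reachable : PySem.Dict Int (PySem.Set Int) :=
    (PySem.List.pyRange 0 n 1).foldl (fun r i => r.insert i (PySem.Set.ofList [i])) PySem.Dict.empty
  solveLoopA coords n reachable sorted_pairs

-- ===== PORT B =====
def distB (p q : List Int) : Int :=
  (p.zip q).foldl (fun acc pq => acc + (pq.1 - pq.2) ^ 2) 0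

-- seen[i] = True; exact: every index written here is produced by the edge builder, so 0 ≤ i < len(seen)
def pySetTrue (s : List Bool) (i : Int) : List Bool := s.set i.toNat true

-- the body of one edge of connected's inner loop: state (seen, changed)
def passB (st : List Bool × Bool) (e : (Int × Int) × Int) : List Bool × Bool :=
  if PySem.List.pyGetD st.1 e.1.1 false ≠ PySem.List.pyGetD st.1 e.1.2 false then
    (pySetTrue (pySetTrue st.1 e.1.1) e.1.2, true)
  else st

-- 'for _ in range(n): … if not changed: break' — structural recursion on the round counter
def satB (E : List ((Int × Int) × Int)) : Nat → List Bool → List Bool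
  | 0, seen => seen
  | r + 1, seen =>
    let p := E.foldl passB (seen, false)
    if p.2 then satB E r p.1 else p.1

def connectedB (edges : List ((Int × Int) × Int)) (n : Int) (k : Int) : Bool :=
  let seen := (PySem.List.pyRange 0 n 1).map (fun v => v == 0)
  (satB (PySem.List.slice edges none (some k)) n.toNat seen).all (fun b => b)

-- 'while lo < hi: …' — the loop body runs at most hi-lo times, which the fuel bounds
def bsearchB (conn : Int → Bool) : Nat → Int → Int → Int
  | 0, lo, _ => lo
  | f + 1, lo, hi =>
    if lo < hi then
      let mid := PySem.Int.floordiv (lo + hi) 2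
      if conn mid then bsearchB conn f lo mid else bsearchB conn f (mid + 1) hi
    else lo

def solve_alt (coords : List (List Int)) : Option Int :=
  let n : Int := PySem.List.len coords
  let edges : List ((Int × Int) × Int) :=
    (PySem.List.pyRange 1 n 1).foldl (fun es j =>
      (PySem.List.pyRange 0 j 1).foldl (fun es i =>
        es ++ [((i, j), distB (PySem.List.pyGetD coords i []) (PySem.List.pyGetD coords j []))]) es) []
  let sortedEdges := PySem.List.sorted edges (fun e => e.2) false
  if n ≤ 1 then none
  else
    let m : Int := PySem.List.len sortedEdges
    let lo := bsearchB (connectedB sortedEdges n) (m - 1).toNat 1 m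
    let e := PySem.List.pyGetD sortedEdges (lo - 1) ((0, 0), 0)
    some (PySem.List.pyGetD (PySem.List.pyGetD coords e.1.1 []) 0 0 *
          PySem.List.pyGetD (PySem.List.pyGetD coords e.1.2 []) 0 0)

-- ===== PRECONDITION & SPEC =====
-- Pre_ excludes inputs with at least two points where some coordinate row is the empty list:
-- there A's (and B's) final 'coords[i][0] * coords[j][0]' may hit an empty row and raise IndexError.
def Pre_solve (coords : List (List Int)) : Prop :=
  coords.length ≤ 1 ∨ ∀ row ∈ coords, row ≠ []
instance (coords : List (List Int)) : Decidable (Pre_solve coords) := by unfold Pre_solve; infer_instance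

def pvWitness_solve : List (List Int) := [[0, 0], [3, 1], [1, 2]]

def Spec_solve (coords : List (List Int)) (out : Option Int) : Prop := out = solve_alt coords
instance (coords : List (List Int)) (out : Option Int) : Decidable (Spec_solve coords out) := by unfold Spec_solve; infer_instance

-- ===== CLAIM (what is proved, stated in full; the proofs are below) =====
def Claim_equal_solve : Prop := ∀ (coords : List (List Int)), Dom_solve coords → Pre_solve coords → Spec_solve coords (solve coords)

-- ===== LEMMAS AND PROOFS =====

-- the symmetric one-step adjacency of an edge list, and reachability = its refl-trans closure
def adjE (E : List ((Int × Int) × Int)) (u v : Int) : Prop :=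
  (∃ d, ((u, v), d) ∈ E) ∨ (∃ d, ((v, u), d) ∈ E)

def Reach (E : List ((Int × Int) × Int)) : Int → Int → Prop :=
  Relation.ReflTransGen (adjE E)

-- the prefix graph is connected: every vertex is reachable from vertex 0
def ConnE (n : Int) (E : List ((Int × Int) × Int)) : Prop :=
  ∀ w : Int, 0 ≤ w → w < n → Reach E 0 w

-- the dict invariant of A's loop: reachable[v] is the component of v in the processed prefix P
def InvR (n : Int) (P : List ((Int × Int) × Int))
    (reachable : PySem.Dict Int (PySem.Set Int)) : Prop :=
  ∀ v : Int, 0 ≤ v → v < n →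
    ∃ S : PySem.Set Int, reachable.get? v = some S ∧ S.Nodup ∧
      ∀ w : Int, w ∈ S ↔ (0 ≤ w ∧ w < n ∧ Reach P v w)

theorem reach_symm {E : List ((Int × Int) × Int)} {u v : Int} (h : Reach E u v) : Reach E v u := by
  have hs : Symmetric (adjE E) := by
    intro a b hab
    rcases hab with ⟨d, hd⟩ | ⟨d, hd⟩
    · exact Or.inr ⟨d, hd⟩
    · exact Or.inl ⟨d, hd⟩
  exact (Relation.ReflTransGen.symmetric hs) h

theorem reach_mono {E E' : List ((Int × Int) × Int)} (hsub : ∀ x ∈ E, x ∈ E') {u v : Int}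
    (h : Reach E u v) : Reach E' u v := by
  refine Relation.ReflTransGen.mono ?_ h
  intro a b hab
  rcases hab with ⟨d, hd⟩ | ⟨d, hd⟩
  · exact Or.inl ⟨d, hsub _ hd⟩
  · exact Or.inr ⟨d, hsub _ hd⟩

theorem reach_nil {u v : Int} (h : Reach [] u v) : v = u := by
  induction h with
  | refl => rfl
  | tail _ hstep ih =>
    rcases hstep with ⟨d, hd⟩ | ⟨d, hd⟩ <;> simp at hd

theorem adj_snoc {P : List ((Int × Int) × Int)} {i j d u w : Int} :
    adjE (P ++ [((i, j), d)]) u w ↔ adjE P u w ∨ (u = i ∧ w = j) ∨ (u = j ∧ w = i) := by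
  unfold adjE
  simp only [List.mem_append, List.mem_singleton, Prod.mk.injEq]
  constructor
  · rintro (⟨d', hd' | ⟨⟨hu, hw⟩, _⟩⟩ | ⟨d', hd' | ⟨⟨hw, hu⟩, _⟩⟩)
    · exact Or.inl (Or.inl ⟨d', hd'⟩)
    · exact Or.inr (Or.inl ⟨hu, hw⟩)
    · exact Or.inl (Or.inr ⟨d', hd'⟩)
    · exact Or.inr (Or.inr ⟨hu, hw⟩)
  · rintro ((⟨d', hd'⟩ | ⟨d', hd'⟩) | ⟨hu, hw⟩ | ⟨hu, hw⟩)
    · exact Or.inl ⟨d', Or.inl hd'⟩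
    · exact Or.inr ⟨d', Or.inl hd'⟩
    · exact Or.inl ⟨d, Or.inr ⟨⟨hu, hw⟩, rfl⟩⟩
    · exact Or.inr ⟨d, Or.inr ⟨⟨hw, hu⟩, rfl⟩⟩

theorem reach_snoc {P : List ((Int × Int) × Int)} {i j d u w : Int} :
    Reach (P ++ [((i, j), d)]) u w ↔
      Reach P u w ∨ (Reach P u i ∧ Reach P j w) ∨ (Reach P u j ∧ Reach P i w) := by
  constructor
  · intro h
    induction h with
    | refl => exact Or.inl Relation.ReflTransGen.refl
    | tail hub hstep ih =>
      rcases adj_snoc.1 hstep with hP | ⟨hb, hc⟩ | ⟨hb, hc⟩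
      · rcases ih with h1 | ⟨h1, h2⟩ | ⟨h1, h2⟩
        · exact Or.inl (h1.tail hP)
        · exact Or.inr (Or.inl ⟨h1, h2.tail hP⟩)
        · exact Or.inr (Or.inr ⟨h1, h2.tail hP⟩)
      · subst hb; subst hc
        rcases ih with h1 | ⟨h1, h2⟩ | ⟨h1, h2⟩
        · exact Or.inr (Or.inl ⟨h1, Relation.ReflTransGen.refl⟩)
        · exact Or.inr (Or.inl ⟨h1, Relation.ReflTransGen.refl⟩)
        · exact Or.inl h1
      · subst hb; subst hc
        rcases ih with h1 | ⟨h1, h2⟩ | ⟨h1, h2⟩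
        · exact Or.inr (Or.inr ⟨h1, Relation.ReflTransGen.refl⟩)
        · exact Or.inl h1
        · exact Or.inr (Or.inr ⟨h1, Relation.ReflTransGen.refl⟩)
  · have hmono : ∀ a b : Int, Reach P a b → Reach (P ++ [((i, j), d)]) a b :=
      fun a b h => reach_mono (fun x hx => List.mem_append.2 (Or.inl hx)) h
    have hedge : Reach (P ++ [((i, j), d)]) i j :=
      Relation.ReflTransGen.single (adj_snoc.2 (Or.inr (Or.inl ⟨rfl, rfl⟩)))
    rintro (h1 | ⟨h1, h2⟩ | ⟨h1, h2⟩)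
    · exact hmono _ _ h1
    · exact ((hmono _ _ h1).trans hedge).trans (hmono _ _ h2)
    · exact ((hmono _ _ h1).trans (reach_symm hedge)).trans (hmono _ _ h2)

theorem full_iff_conn {n : Int} {E : List ((Int × Int) × Int)} {i : Int}
    (h0 : 0 ≤ i) (h1 : i < n) :
    (∀ w : Int, 0 ≤ w → w < n → Reach E i w) ↔ ConnE n E := by
  constructor
  · intro h w hw0 hw1
    have h0i : Reach E 0 i := reach_symm (h 0 le_rfl (lt_of_le_of_lt h0 h1))
    exact h0i.trans (h w hw0 hw1)
  · intro h w hw0 hw1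
    exact (reach_symm (h i h0 h1)).trans (h w hw0 hw1)

theorem get?_foldl_insert_fn {ν : Type} (f : Int → ν) (l : List Int) (r : PySem.Dict Int ν) (x : Int) :
    (l.foldl (fun r v => r.insert v (f v)) r).get? x = if x ∈ l then some (f x) else r.get? x := by
  induction l generalizing r with
  | nil => simp
  | cons h t ih =>
    simp only [List.foldl_cons, ih, PySem.Dict.get?_insert, List.mem_cons]
    by_cases hx : x ∈ t <;> by_cases hxh : x = h <;> simp [hx, hxh]

theorem len_eq_iff_full (S : List Int) (n : Int) (hn : 0 ≤ n) (hnd : S.Nodup)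
    (hsub : ∀ w ∈ S, 0 ≤ w ∧ w < n) :
    ((S.length : Int) = n ↔ ∀ w : Int, 0 ≤ w → w < n → w ∈ S) := by
  have hRnd := PySem.List.nodup_pyRange_one 0 n
  have hRlen : (PySem.List.pyRange 0 n 1).length = n.toNat := by
    rw [PySem.List.length_pyRange_one]; omega
  have hsubF : S.toFinset ⊆ (PySem.List.pyRange 0 n 1).toFinset := by
    intro w hw
    rw [List.mem_toFinset] at *
    exact PySem.List.mem_pyRange_one.2 ⟨(hsub w hw).1, (hsub w hw).2⟩
  constructor
  · intro hlen w h0 h1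
    have hcard : (PySem.List.pyRange 0 n 1).toFinset.card ≤ S.toFinset.card := by
      rw [List.toFinset_card_of_nodup hnd, List.toFinset_card_of_nodup hRnd, hRlen]
      omega
    have := Finset.eq_of_subset_of_card_le hsubF hcard
    have hw : w ∈ (PySem.List.pyRange 0 n 1).toFinset := by
      rw [List.mem_toFinset]; exact PySem.List.mem_pyRange_one.2 ⟨h0, h1⟩
    rw [← this, List.mem_toFinset] at hw; exact hw
  · intro hfull
    have hsupF : (PySem.List.pyRange 0 n 1).toFinset ⊆ S.toFinset := by
      intro w hw
      rw [List.mem_toFinset] at *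
      exact hfull w (PySem.List.mem_pyRange_one.1 hw).1 (PySem.List.mem_pyRange_one.1 hw).2
    have := Finset.Subset.antisymm hsubF hsupF
    have hc : S.toFinset.card = (PySem.List.pyRange 0 n 1).toFinset.card := by rw [this]
    rw [List.toFinset_card_of_nodup hnd, List.toFinset_card_of_nodup hRnd, hRlen] at hc
    omega

theorem init_inv (n : Int) :
    InvR n [] ((PySem.List.pyRange 0 n 1).foldl
        (fun r i => r.insert i (PySem.Set.ofList [i])) PySem.Dict.empty) := by
  intro v hv0 hv1
  refine ⟨PySem.Set.ofList [v], ?_, ?_, ?_⟩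
  · rw [get?_foldl_insert_fn (fun i => PySem.Set.ofList [i]),
      if_pos (PySem.List.mem_pyRange_one.2 ⟨hv0, hv1⟩)]
  · simp [PySem.Set.ofList, PySem.Set.add]
  · intro w
    rw [PySem.Set.mem_ofList]
    constructor
    · intro hw
      have hwv : w = v := by simpa using hw
      subst hwv
      exact ⟨hv0, hv1, Relation.ReflTransGen.refl⟩
    · rintro ⟨h0, h1, heq⟩
      have := reach_nil heq
      simp [this]

-- A's loop returns the product of the first edge whose prefix makes the graph connected
theorem loopA_min (coords : List (List Int)) (n : Int) (hn : 2 ≤ n) :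
    ∀ (L P : List ((Int × Int) × Int))
      (reachable : PySem.Dict Int (PySem.Set Int)) (k0 : Nat),
      (∀ p ∈ L, 0 ≤ p.1.1 ∧ p.1.1 < p.1.2 ∧ p.1.2 < n) →
      InvR n P reachable →
      1 ≤ k0 → k0 ≤ L.length →
      ConnE n (P ++ L.take k0) →
      (∀ j : Nat, j < k0 → ¬ ConnE n (P ++ L.take j)) →
      solveLoopA coords n reachable L =
        (L[k0 - 1]?).map (fun e =>
          PySem.List.pyGetD (PySem.List.pyGetD coords e.1.1 []) 0 0 *
          PySem.List.pyGetD (PySem.List.pyGetD coords e.1.2 []) 0 0) := by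
  intro L
  induction L with
  | nil =>
    intro P r k0 _ _ h1 h2 _ _
    exact absurd (Nat.le_trans h1 h2) (by simp)
  | cons e rest ih =>
    obtain ⟨⟨i, j⟩, dv⟩ := e
    intro P reachable k0 hb hinv hk1 hk2 hconn hmin
    obtain ⟨hi0, hij, hjn⟩ := hb ((i, j), dv) (by simp)
    have hj0 : 0 ≤ j := le_trans hi0 (le_of_lt hij)
    have hin : i < n := lt_trans hij hjn
    obtain ⟨Si, hSi, hSind, hSimem⟩ := hinv i hi0 hin
    obtain ⟨Sj, hSj, hSjnd, hSjmem⟩ := hinv j hj0 hjn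
    have hedge : Reach (P ++ [((i, j), dv)]) i j :=
      Relation.ReflTransGen.single (adj_snoc.2 (Or.inr (Or.inl ⟨rfl, rfl⟩)))
    have m1 : ∀ w : Int, w ∈ PySem.Set.update Si Sj ↔
        (0 ≤ w ∧ w < n ∧ Reach (P ++ [((i, j), dv)]) i w) := by
      intro w
      rw [PySem.Set.mem_update, hSimem w, hSjmem w]
      constructor
      · rintro (⟨h0, h1, h2⟩ | ⟨h0, h1, h2⟩)
        · exact ⟨h0, h1, reach_snoc.2 (Or.inl h2)⟩
        · exact ⟨h0, h1, reach_snoc.2 (Or.inr (Or.inl ⟨Relation.ReflTransGen.refl, h2⟩))⟩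
      · rintro ⟨h0, h1, h2⟩
        rcases reach_snoc.1 h2 with h3 | ⟨h3, h4⟩ | ⟨h3, h4⟩
        · exact Or.inl ⟨h0, h1, h3⟩
        · exact Or.inr ⟨h0, h1, h4⟩
        · exact Or.inl ⟨h0, h1, h4⟩
    have m2 : (PySem.Set.update Si Sj).Nodup := PySem.Set.nodup_update Si Sj hSind
    have m3 : (PySem.List.len (PySem.Set.update Si Sj) = n) ↔ ConnE n (P ++ [((i, j), dv)]) := by
      rw [PySem.List.len_eq,
        len_eq_iff_full (PySem.Set.update Si Sj) n (by omega) m2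
          (fun w hw => ⟨((m1 w).1 hw).1, ((m1 w).1 hw).2.1⟩),
        ← full_iff_conn hi0 hin]
      constructor
      · intro h w h0 h1
        exact ((m1 w).1 (h w h0 h1)).2.2
      · intro h w h0 h1
        exact (m1 w).2 ⟨h0, h1, h w h0 h1⟩
    rw [solveLoopA, PySem.Dict.getD_of_get?_eq_some _ _ hSi, PySem.Dict.getD_of_get?_eq_some _ _ hSj]
    by_cases hc1 : ConnE n (P ++ [((i, j), dv)])
    · have hk01 : k0 = 1 := by
        by_contra hne
        exact hmin 1 (by omega) (by simpa using hc1)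
      rw [if_pos (m3.2 hc1)]
      subst hk01
      simp
    · rw [if_neg (fun h => hc1 (m3.1 h))]
      have hk02 : 2 ≤ k0 := by
        rcases Nat.lt_or_ge k0 2 with h | h
        · have hk01 : k0 = 1 := by omega
          subst hk01
          exact absurd (by simpa using hconn) hc1
        · exact h
      have htake : ∀ m : Nat, P ++ (((i, j), dv) :: rest).take (m + 1)
          = (P ++ [((i, j), dv)]) ++ rest.take m := by
        intro m
        simp [List.take_succ_cons]
      have hinv' : InvR n (P ++ [((i, j), dv)])
          ((PySem.Set.update Si Sj).foldl (fun r v => r.insert v (PySem.Set.update Si Sj)) reachable) := by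
        intro v hv0 hv1
        by_cases hvs : v ∈ PySem.Set.update Si Sj
        · refine ⟨PySem.Set.update Si Sj, ?_, m2, ?_⟩
          · rw [get?_foldl_insert_fn (fun _ => PySem.Set.update Si Sj), if_pos hvs]
          · intro w
            have hiv : Reach (P ++ [((i, j), dv)]) i v := ((m1 v).1 hvs).2.2
            rw [m1 w]
            constructor
            · rintro ⟨h0, h1, h2⟩
              exact ⟨h0, h1, (reach_symm hiv).trans h2⟩
            · rintro ⟨h0, h1, h2⟩
              exact ⟨h0, h1, hiv.trans h2⟩
        · obtain ⟨S, hS, hSnd, hSmem⟩ := hinv v hv0 hv1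
          refine ⟨S, ?_, hSnd, ?_⟩
          · rw [get?_foldl_insert_fn (fun _ => PySem.Set.update Si Sj), if_neg hvs, hS]
          · intro w
            have hnvi : ¬ Reach P v i := by
              intro h
              exact hvs ((m1 v).2 ⟨hv0, hv1,
                reach_symm (reach_mono (fun x hx => List.mem_append.2 (Or.inl hx)) h)⟩)
            have hnvj : ¬ Reach P v j := by
              intro h
              exact hvs ((m1 v).2 ⟨hv0, hv1,
                hedge.trans (reach_symm (reach_mono (fun x hx => List.mem_append.2 (Or.inl hx)) h))⟩)
            rw [hSmem w]
            constructor
            · rintro ⟨h0, h1, h2⟩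
              exact ⟨h0, h1, reach_snoc.2 (Or.inl h2)⟩
            · rintro ⟨h0, h1, h2⟩
              rcases reach_snoc.1 h2 with h3 | ⟨h3, h4⟩ | ⟨h3, h4⟩
              · exact ⟨h0, h1, h3⟩
              · exact absurd h3 hnvi
              · exact absurd h3 hnvj
      have hconn' : ConnE n ((P ++ [((i, j), dv)]) ++ rest.take (k0 - 1)) := by
        rw [← htake (k0 - 1)]
        have : k0 - 1 + 1 = k0 := by omega
        rw [this]
        exact hconn
      have hmin' : ∀ j' : Nat, j' < k0 - 1 →
          ¬ ConnE n ((P ++ [((i, j), dv)]) ++ rest.take j') := by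
        intro j' hj'
        rw [← htake j']
        exact hmin (j' + 1) (by omega)
      have := ih (P ++ [((i, j), dv)])
        ((PySem.Set.update Si Sj).foldl (fun r v => r.insert v (PySem.Set.update Si Sj)) reachable)
        (k0 - 1) (fun p hp => hb p (by simp [hp])) hinv' (by omega) (by simp at hk2; omega)
        hconn' hmin'
      rw [this]
      have hidx : k0 - 1 = (k0 - 2) + 1 := by omega
      have hidx2 : k0 - 1 - 1 = k0 - 2 := by omega
      rw [hidx2, hidx, List.getElem?_cons_succ]

-- ===== B-side lemmas =====

theorem pyGetD_false_of_ge {s : List Bool} {w : Int} (h0 : 0 ≤ w) (h : (s.length : Int) ≤ w) :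
    PySem.List.pyGetD s w false = false := by
  have hw : w = ((w.toNat : Nat) : Int) := by omega
  rw [hw, PySem.List.pyGetD_natCast]
  exact List.getD_eq_default s false (by omega)

theorem passB_len (st : List Bool × Bool) (e : (Int × Int) × Int) :
    (passB st e).1.length = st.1.length := by
  unfold passB pySetTrue
  split <;> simp

theorem foldl_passB_len (E : List ((Int × Int) × Int)) (st : List Bool × Bool) :
    (E.foldl passB st).1.length = st.1.length := by
  induction E generalizing st with
  | nil => rfl
  | cons e t ih => rw [List.foldl_cons, ih, passB_len]

theorem passB_mono? (st : List Bool × Bool) (e : (Int × Int) × Int)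
    (k : Nat) (h : st.1[k]? = some true) :
    (passB st e).1[k]? = some true := by
  have hk : k < st.1.length := by
    by_contra hc
    rw [List.getElem?_eq_none (by omega)] at h
    cases h
  unfold passB pySetTrue
  split
  · simp only []
    by_cases h2 : e.1.2.toNat = k
    · subst h2
      rw [List.getElem?_set_self (by simpa using hk)]
    · rw [List.getElem?_set_ne (by omega)]
      by_cases h1 : e.1.1.toNat = k
      · subst h1
        rw [List.getElem?_set_self (by simpa using hk)]
      · rw [List.getElem?_set_ne (by omega)]
        exact h
  · exact h

theorem foldl_passB_mono (E : List ((Int × Int) × Int)) (st : List Bool × Bool)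
    (k : Nat) (h : st.1[k]? = some true) :
    (E.foldl passB st).1[k]? = some true := by
  induction E generalizing st with
  | nil => exact h
  | cons e t ih =>
    rw [List.foldl_cons]
    exact ih (passB st e) (passB_mono? st e k h)

theorem passB_flag_mono (st : List Bool × Bool) (e : (Int × Int) × Int)
    (h : st.2 = true) : (passB st e).2 = true := by
  unfold passB; split <;> simp [h]

theorem foldl_passB_flag_mono (E : List ((Int × Int) × Int)) (st : List Bool × Bool)
    (h : st.2 = true) : (E.foldl passB st).2 = true := by
  induction E generalizing st with
  | nil => exact h
  | cons e t ih => rw [List.foldl_cons]; exact ih _ (passB_flag_mono st e h)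

theorem foldl_passB_unchanged (E : List ((Int × Int) × Int)) (s : List Bool)
    (h : (E.foldl passB (s, false)).2 = false) :
    (E.foldl passB (s, false)).1 = s ∧
      ∀ e ∈ E, PySem.List.pyGetD s e.1.1 false = PySem.List.pyGetD s e.1.2 false := by
  induction E generalizing s with
  | nil => exact ⟨rfl, by simp⟩
  | cons e t ih =>
    rw [List.foldl_cons] at h ⊢
    by_cases hne : PySem.List.pyGetD s e.1.1 false ≠ PySem.List.pyGetD s e.1.2 false
    · exfalso
      have hstep : passB (s, false) e = (pySetTrue (pySetTrue s e.1.1) e.1.2, true) := by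
        unfold passB; rw [if_pos hne]
      rw [hstep] at h
      have := foldl_passB_flag_mono t (pySetTrue (pySetTrue s e.1.1) e.1.2, true) rfl
      rw [this] at h
      cases h
    · simp only [ne_eq, not_not] at hne
      have hstep : passB (s, false) e = (s, false) := by
        unfold passB; rw [if_neg (by simpa using hne)]
      rw [hstep] at h ⊢
      obtain ⟨h1, h2⟩ := ih s h
      refine ⟨h1, ?_⟩
      intro e' he'
      rcases List.mem_cons.1 he' with rfl | he'
      · exact hne
      · exact h2 e' he'

theorem foldl_passB_flip (n : Int) (E : List ((Int × Int) × Int)) (s : List Bool)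
    (hb : ∀ p ∈ E, 0 ≤ p.1.1 ∧ p.1.1 < p.1.2 ∧ p.1.2 < n)
    (hlen : (s.length : Int) = n)
    (h : (E.foldl passB (s, false)).2 = true) :
    ∃ k : Nat, s[k]? = some false ∧ (E.foldl passB (s, false)).1[k]? = some true := by
  induction E generalizing s with
  | nil => cases h
  | cons e t ih =>
    rw [List.foldl_cons] at h ⊢
    obtain ⟨hi0, hij, hjn⟩ := hb e (by simp)
    have hilen : e.1.1.toNat < s.length := by omega
    have hjlen : e.1.2.toNat < s.length := by omega
    have hne' : e.1.1.toNat ≠ e.1.2.toNat := by omega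
    have hgi : PySem.List.pyGetD s e.1.1 false = s[e.1.1.toNat] :=
      PySem.List.pyGetD_eq_getElem s false hi0 (by omega)
    have hgj : PySem.List.pyGetD s e.1.2 false = s[e.1.2.toNat] :=
      PySem.List.pyGetD_eq_getElem s false (by omega) (by omega)
    by_cases hne : PySem.List.pyGetD s e.1.1 false ≠ PySem.List.pyGetD s e.1.2 false
    · have hstep : passB (s, false) e = (pySetTrue (pySetTrue s e.1.1) e.1.2, true) := by
        unfold passB; rw [if_pos hne]
      rw [hstep]
      have hset2 : (pySetTrue (pySetTrue s e.1.1) e.1.2)[e.1.2.toNat]? = some true := by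
        unfold pySetTrue
        rw [List.getElem?_set_self (by simpa using hjlen)]
      have hset1 : (pySetTrue (pySetTrue s e.1.1) e.1.2)[e.1.1.toNat]? = some true := by
        unfold pySetTrue
        rw [List.getElem?_set_ne (by omega), List.getElem?_set_self hilen]
      cases h1 : s[e.1.1.toNat] with
      | false =>
        refine ⟨e.1.1.toNat, ?_, ?_⟩
        · rw [List.getElem?_eq_getElem hilen, h1]
        · exact foldl_passB_mono t _ _ hset1
      | true =>
        have h2 : s[e.1.2.toNat] = false := by
          cases h2 : s[e.1.2.toNat] with
          | false => rfl
          | true => exact absurd (by rw [hgi, hgj, h1, h2]) hne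
        refine ⟨e.1.2.toNat, ?_, ?_⟩
        · rw [List.getElem?_eq_getElem hjlen, h2]
        · exact foldl_passB_mono t _ _ hset2
    · have hstep : passB (s, false) e = (s, false) := by
        unfold passB; rw [if_neg (by simpa using hne)]
      rw [hstep] at h ⊢
      exact ih s (fun p hp => hb p (by simp [hp])) hlen h

theorem count_true_le (s t : List Bool) (hlen : s.length = t.length)
    (hmono : ∀ k : Nat, s[k]? = some true → t[k]? = some true) :
    s.count true ≤ t.count true := by
  induction s generalizing t with
  | nil => simp
  | cons a s' ih =>
    cases t with
    | nil => simp at hlen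
    | cons b t' =>
      have htail : ∀ k : Nat, s'[k]? = some true → t'[k]? = some true := by
        intro k hk
        have := hmono (k + 1) (by simpa using hk)
        simpa using this
      have hle := ih t' (by simpa using hlen) htail
      cases a with
      | false =>
        cases b <;> simp <;> omega
      | true =>
        have hb : b = true := by
          have := hmono 0 (by simp)
          simpa using this
        subst hb
        simp
        omega

theorem count_true_lt (s t : List Bool) (hlen : s.length = t.length)
    (hmono : ∀ k : Nat, s[k]? = some true → t[k]? = some true)
    (hflip : ∃ k : Nat, s[k]? = some false ∧ t[k]? = some true) :
    s.count true < t.count true := by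
  induction s generalizing t with
  | nil =>
    obtain ⟨k, hk, _⟩ := hflip
    simp at hk
  | cons a s' ih =>
    cases t with
    | nil => simp at hlen
    | cons b t' =>
      have htail : ∀ k : Nat, s'[k]? = some true → t'[k]? = some true := by
        intro k hk
        have := hmono (k + 1) (by simpa using hk)
        simpa using this
      obtain ⟨k, hkf, hkt⟩ := hflip
      cases k with
      | zero =>
        have ha : a = false := by simpa using hkf
        have hb : b = true := by simpa using hkt
        subst ha; subst hb
        have hle := count_true_le s' t' (by simpa using hlen) htail
        simp
        omega
      | succ k' =>
        have hflip' : ∃ k : Nat, s'[k]? = some false ∧ t'[k]? = some true :=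
          ⟨k', by simpa using hkf, by simpa using hkt⟩
        have hlt := ih t' (by simpa using hlen) htail hflip'
        cases a with
        | false =>
          cases b <;> simp <;> omega
        | true =>
          have hb : b = true := by
            have := hmono 0 (by simp)
            simpa using this
          subst hb
          simp
          omega

theorem satB_len (E : List ((Int × Int) × Int)) (f : Nat) (s : List Bool) :
    (satB E f s).length = s.length := by
  induction f generalizing s with
  | zero => rfl
  | succ r ih =>
    show (if (E.foldl passB (s, false)).2 then satB E r (E.foldl passB (s, false)).1
          else (E.foldl passB (s, false)).1).length = s.length
    split
    · rw [ih, foldl_passB_len]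
    · rw [foldl_passB_len]

theorem satB_mono (E : List ((Int × Int) × Int)) (f : Nat) (s : List Bool)
    (k : Nat) (h : s[k]? = some true) :
    (satB E f s)[k]? = some true := by
  induction f generalizing s with
  | zero => exact h
  | succ r ih =>
    show (if (E.foldl passB (s, false)).2 then satB E r (E.foldl passB (s, false)).1
          else (E.foldl passB (s, false)).1)[k]? = some true
    split
    · exact ih _ (foldl_passB_mono E _ k h)
    · exact foldl_passB_mono E _ k h

theorem satB_closed (n : Int) (E : List ((Int × Int) × Int))
    (hb : ∀ p ∈ E, 0 ≤ p.1.1 ∧ p.1.1 < p.1.2 ∧ p.1.2 < n) :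
    ∀ (f : Nat) (s : List Bool), (s.length : Int) = n → n.toNat < f + s.count true →
      ∀ e ∈ E, PySem.List.pyGetD (satB E f s) e.1.1 false
        = PySem.List.pyGetD (satB E f s) e.1.2 false := by
  intro f
  induction f with
  | zero =>
    intro s hlen hcount
    exfalso
    have := List.count_le_length (a := true) (l := s)
    omega
  | succ r ih =>
    intro s hlen hcount e he
    have hsat : satB E (r + 1) s = if (E.foldl passB (s, false)).2 then
        satB E r (E.foldl passB (s, false)).1 else (E.foldl passB (s, false)).1 := rfl
    by_cases hflag : (E.foldl passB (s, false)).2 = true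
    · rw [hsat, if_pos hflag]
      have hflip := foldl_passB_flip n E s hb hlen hflag
      have hlt := count_true_lt s (E.foldl passB (s, false)).1
        (by rw [foldl_passB_len]) (fun k hk => foldl_passB_mono E (s, false) k hk) hflip
      exact ih (E.foldl passB (s, false)).1 (by rw [foldl_passB_len]; exact hlen) (by omega) e he
    · have hflag' : (E.foldl passB (s, false)).2 = false := by simpa using hflag
      obtain ⟨heq, hclosed⟩ := foldl_passB_unchanged E s hflag'
      rw [hsat, if_neg hflag, heq]
      exact hclosed e he

theorem foldl_passB_sound (n : Int) (E0 : List ((Int × Int) × Int)) :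
    ∀ (E : List ((Int × Int) × Int)) (s : List Bool) (c : Bool),
      (∀ p ∈ E, 0 ≤ p.1.1 ∧ p.1.1 < p.1.2 ∧ p.1.2 < n) →
      (∀ p ∈ E, p ∈ E0) →
      (∀ w : Int, 0 ≤ w → PySem.List.pyGetD s w false = true → Reach E0 0 w) →
      ∀ w : Int, 0 ≤ w → PySem.List.pyGetD (E.foldl passB (s, c)).1 w false = true →
        Reach E0 0 w := by
  intro E
  induction E with
  | nil =>
    intro s c _ _ hs
    exact hs
  | cons e t ih =>
    intro s c hb hsub hs
    rw [List.foldl_cons]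
    obtain ⟨hi0, hij, hjn⟩ := hb e (by simp)
    have he0 : e ∈ E0 := hsub e (by simp)
    by_cases hne : PySem.List.pyGetD s e.1.1 false ≠ PySem.List.pyGetD s e.1.2 false
    · have hstep : passB (s, c) e = (pySetTrue (pySetTrue s e.1.1) e.1.2, true) := by
        unfold passB
        rw [if_pos hne]
      rw [hstep]
      have hadj : adjE E0 e.1.1 e.1.2 := Or.inl ⟨e.2, he0⟩
      have hri : Reach E0 0 e.1.1 ∧ Reach E0 0 e.1.2 := by
        cases hgi : PySem.List.pyGetD s e.1.1 false with
        | true =>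
          have h1 := hs e.1.1 hi0 hgi
          exact ⟨h1, h1.tail hadj⟩
        | false =>
          have hgj : PySem.List.pyGetD s e.1.2 false = true := by
            cases hgj : PySem.List.pyGetD s e.1.2 false with
            | true => rfl
            | false => exact absurd (hgi.trans hgj.symm) hne
          have h2 := hs e.1.2 (by omega) hgj
          exact ⟨h2.tail (Or.inr ⟨e.2, he0⟩), h2⟩
      refine ih _ true (fun p hp => hb p (by simp [hp])) (fun p hp => hsub p (by simp [hp])) ?_
      intro w hw0 hw
      have hlen' : (pySetTrue (pySetTrue s e.1.1) e.1.2).length = s.length := by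
        unfold pySetTrue
        simp
      have hwlt : w.toNat < s.length := by
        by_contra hge
        rw [pyGetD_false_of_ge hw0 (by omega)] at hw
        cases hw
      rw [PySem.List.pyGetD_eq_getElem _ false hw0 (by omega)] at hw
      by_cases hwj : w.toNat = e.1.2.toNat
      · have hwe : w = e.1.2 := by omega
        rw [hwe]
        exact hri.2
      · unfold pySetTrue at hw
        rw [List.getElem_set_ne (by omega)] at hw
        by_cases hwi : w.toNat = e.1.1.toNat
        · have hwe : w = e.1.1 := by omega
          rw [hwe]
          exact hri.1
        · rw [List.getElem_set_ne (by omega)] at hw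
          refine hs w hw0 ?_
          rw [PySem.List.pyGetD_eq_getElem s false hw0 (by omega)]
          exact hw
    · have hstep : passB (s, c) e = (s, c) := by
        unfold passB
        rw [if_neg hne]
      rw [hstep]
      exact ih s c (fun p hp => hb p (by simp [hp])) (fun p hp => hsub p (by simp [hp])) hs

theorem satB_sound (n : Int) (E : List ((Int × Int) × Int)) (f : Nat) (s : List Bool)
    (hb : ∀ p ∈ E, 0 ≤ p.1.1 ∧ p.1.1 < p.1.2 ∧ p.1.2 < n)
    (hs : ∀ w : Int, 0 ≤ w → PySem.List.pyGetD s w false = true → Reach E 0 w) :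
    ∀ w : Int, 0 ≤ w → PySem.List.pyGetD (satB E f s) w false = true → Reach E 0 w := by
  induction f generalizing s with
  | zero => exact hs
  | succ r ih =>
    have hsat : satB E (r + 1) s = if (E.foldl passB (s, false)).2 then
        satB E r (E.foldl passB (s, false)).1 else (E.foldl passB (s, false)).1 := rfl
    rw [hsat]
    have hnext := foldl_passB_sound n E E s false hb (fun p hp => hp) hs
    by_cases hflag : (E.foldl passB (s, false)).2 = true
    · rw [if_pos hflag]
      exact ih _ hnext
    · rw [if_neg hflag]
      exact hnext

theorem closed_complete (E : List ((Int × Int) × Int)) (t : List Bool)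
    (hclosed : ∀ e ∈ E, PySem.List.pyGetD t e.1.1 false = PySem.List.pyGetD t e.1.2 false)
    (h0 : PySem.List.pyGetD t 0 false = true) :
    ∀ w : Int, Reach E 0 w → PySem.List.pyGetD t w false = true := by
  intro w h
  induction h with
  | refl => exact h0
  | tail hub hstep ihc =>
    rcases hstep with ⟨d, hd⟩ | ⟨d, hd⟩
    · have := hclosed _ hd
      rw [← this]
      exact ihc
    · have := hclosed _ hd
      rw [this]
      exact ihc

theorem connectedB_iff (E : List ((Int × Int) × Int)) (n : Int) (k : Int)
    (hn : 2 ≤ n) (hk : 0 ≤ k)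
    (hb : ∀ p ∈ E, 0 ≤ p.1.1 ∧ p.1.1 < p.1.2 ∧ p.1.2 < n) :
    (connectedB E n k = true ↔ ConnE n (E.take k.toNat)) := by
  have hslice : PySem.List.slice E none (some k) = E.take k.toNat := PySem.List.slice_to E hk
  have hbk : ∀ p ∈ E.take k.toNat, 0 ≤ p.1.1 ∧ p.1.1 < p.1.2 ∧ p.1.2 < n :=
    fun p hp => hb p (List.take_subset _ _ hp)
  have hlen0 : (((PySem.List.pyRange 0 n 1).map (fun v => (v == 0 : Bool))).length : Int) = n := by
    rw [List.length_map, PySem.List.length_pyRange_one]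
    omega
  have hget0 : ∀ w : Int, 0 ≤ w → w < n →
      PySem.List.pyGetD ((PySem.List.pyRange 0 n 1).map (fun v => (v == 0 : Bool))) w false
        = (w == 0) :=
    fun w h0 h1 => PySem.List.pyGetD_map_pyRange_of_nonneg _ n w false h0 h1
  unfold connectedB
  rw [hslice]
  have hinit : ∀ w : Int, 0 ≤ w →
      PySem.List.pyGetD ((PySem.List.pyRange 0 n 1).map (fun v => (v == 0 : Bool))) w false = true →
      Reach (E.take k.toNat) 0 w := by
    intro w hw0 hw
    by_cases hwn : w < n
    · rw [hget0 w hw0 hwn] at hw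
      have hw0' : w = 0 := by simpa using hw
      rw [hw0']
      exact Relation.ReflTransGen.refl
    · rw [pyGetD_false_of_ge hw0 (by omega)] at hw
      cases hw
  have hlent : ((satB (E.take k.toNat) n.toNat
      ((PySem.List.pyRange 0 n 1).map (fun v => (v == 0 : Bool)))).length : Int) = n := by
    rw [satB_len]
    exact hlen0
  constructor
  · intro hall w h0 h1
    refine satB_sound n (E.take k.toNat) n.toNat _ hbk hinit w h0 ?_
    rw [PySem.List.pyGetD_eq_getElem _ false h0 (by omega)]
    exact (List.all_eq_true.1 hall) _ (List.getElem_mem (by omega))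
  · intro hconn
    have hcnt : 0 < ((PySem.List.pyRange 0 n 1).map (fun v => (v == 0 : Bool))).count true := by
      refine List.count_pos_iff.2 ?_
      exact List.mem_map.2 ⟨0, PySem.List.mem_pyRange_one.2 ⟨le_rfl, by omega⟩, by simp⟩
    have hclosed := satB_closed n (E.take k.toNat) hbk n.toNat _ hlen0 (by omega)
    have h0t : PySem.List.pyGetD (satB (E.take k.toNat) n.toNat
        ((PySem.List.pyRange 0 n 1).map (fun v => (v == 0 : Bool)))) 0 false = true := by
      have hs00 : ((PySem.List.pyRange 0 n 1).map (fun v => (v == 0 : Bool)))[0]? = some true := by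
        rw [List.getElem?_eq_getElem (by rw [List.length_map, PySem.List.length_pyRange_one]; omega)]
        simp [PySem.List.getElem_pyRange_one]
      have hmono0 := satB_mono (E.take k.toNat) n.toNat _ 0 hs00
      rw [PySem.List.pyGetD_eq_getElem _ false le_rfl (by omega)]
      rw [List.getElem?_eq_getElem (by omega)] at hmono0
      simpa using hmono0
    have hcompl := closed_complete (E.take k.toNat) _ hclosed h0t
    rw [List.all_eq_true]
    intro x hx
    obtain ⟨kk, hkk, rfl⟩ := List.mem_iff_getElem.1 hx
    have hkn : (kk : Int) < n := by omega
    have hres := hcompl (kk : Int) (hconn kk (Int.natCast_nonneg kk) hkn)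
    rw [PySem.List.pyGetD_eq_getElem _ false (Int.natCast_nonneg kk) (by omega)] at hres
    simpa using hres

theorem bsearchB_eq (conn : Int → Bool) (k0 m : Int)
    (hconn : ∀ k : Int, 1 ≤ k → k ≤ m → (conn k = true ↔ k0 ≤ k)) :
    ∀ (fuel : Nat) (lo hi : Int), 1 ≤ lo → lo ≤ k0 → k0 ≤ hi → hi ≤ m →
      (hi - lo).toNat ≤ fuel → bsearchB conn fuel lo hi = k0 := by
  intro fuel
  induction fuel with
  | zero =>
    intro lo hi h1 h2 h3 h4 h5
    have hlo : lo = k0 := by omega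
    rw [bsearchB, hlo]
  | succ f ih =>
    intro lo hi h1 h2 h3 h4 h5
    rw [bsearchB]
    by_cases hlt : lo < hi
    · rw [if_pos hlt]
      obtain ⟨hm1, hm2⟩ := PySem.Int.floordiv_two_mid_bounds (le_of_lt hlt)
      have hm3 : PySem.Int.floordiv (lo + hi) 2 < hi := by
        rw [PySem.Int.floordiv_lt_iff_lt_mul (by omega)]
        omega
      by_cases hc : conn (PySem.Int.floordiv (lo + hi) 2) = true
      · have hk0mid := (hconn _ (by omega) (by omega)).1 hc
        rw [if_pos hc]
        exact ih lo _ h1 h2 hk0mid (by omega) (by omega)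
      · have hmidlt : ¬ k0 ≤ PySem.Int.floordiv (lo + hi) 2 :=
          fun h => hc ((hconn _ (by omega) (by omega)).2 h)
        rw [if_neg hc]
        exact ih _ hi (by omega) (by omega) h3 h4 (by omega)
    · rw [if_neg hlt]
      omega

theorem conn_mono (n : Int) (L : List ((Int × Int) × Int)) (j k : Nat) (hjk : j ≤ k)
    (h : ConnE n (L.take j)) : ConnE n (L.take k) := by
  intro w hw0 hw1
  refine reach_mono ?_ (h w hw0 hw1)
  intro x hx
  have hpre : L.take j <+: L.take k := by
    have heq : L.take j = (L.take k).take j := by rw [List.take_take, Nat.min_eq_left hjk]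
    rw [heq]
    exact List.take_prefix _ _
  exact hpre.subset hx

-- ===== shared edge-list shape lemmas =====

theorem dict_items_eq (dist : Int → Int → Int) :
    ∀ (js : List Int) (d : PySem.Dict (Int × Int) Int), js.Nodup →
    (∀ p ∈ d.items, p.1.2 ∉ js) →
    (js.foldl (fun d j =>
      (PySem.List.pyRange 0 j 1).foldl (fun d i => d.insert (i, j) (dist i j)) d) d).items
    = d.items ++ js.flatMap (fun j => (PySem.List.pyRange 0 j 1).map (fun i => ((i, j), dist i j))) := by
  intro js
  induction js with
  | nil => simp
  | cons j t ih =>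
    intro d hnd hfresh
    rw [List.foldl_cons]
    have hinner : ((PySem.List.pyRange 0 j 1).foldl (fun d i => d.insert (i, j) (dist i j)) d).items
        = d.items ++ (PySem.List.pyRange 0 j 1).map (fun i => ((i, j), dist i j)) := by
      have h1 : ∀ a ∈ PySem.List.pyRange 0 j 1, d.contains ((a, j)) = false := by
        intro a _
        by_contra h
        have hc : d.contains (a, j) = true := by
          cases hcc : d.contains (a, j) with
          | true => rfl
          | false => exact absurd hcc h
        rcases (PySem.Dict.contains_iff_mem_keys d (a, j)).1 hc with hk
        have : (a, j) ∈ d.items.map Prod.fst := hk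
        rcases List.mem_map.1 this with ⟨p, hp, hpe⟩
        exact hfresh p hp (by rw [hpe]; simp)
      have h2 : ((PySem.List.pyRange 0 j 1).map (fun a => ((a, j) : Int × Int))).Nodup :=
        (PySem.List.nodup_pyRange_one 0 j).map
          (fun a b h => by simpa using congrArg Prod.fst h)
      exact PySem.Dict.items_foldl_insert_fresh (PySem.List.pyRange 0 j 1)
        (fun a => (a, j)) (fun a => dist a j) d h1 h2
    rw [ih _ (List.nodup_cons.1 hnd).2, hinner, List.flatMap_cons, List.append_assoc]
    intro p hp
    rw [hinner] at hp
    rcases List.mem_append.1 hp with h | h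
    · exact fun ht => hfresh p h (by simp [ht])
    · rcases List.mem_map.1 h with ⟨a, _, rfl⟩
      simpa using (List.nodup_cons.1 hnd).1

theorem b_edges_eq (dist : Int → Int → Int) (js : List Int) :
    js.foldl (fun es j =>
      (PySem.List.pyRange 0 j 1).foldl (fun es i => es ++ [((i, j), dist i j)]) es) []
    = js.flatMap (fun j => (PySem.List.pyRange 0 j 1).map (fun i => ((i, j), dist i j))) := by
  rw [PySem.List.foldl_congr_mem js _
        (fun es j => es ++ (PySem.List.pyRange 0 j 1).map (fun i => ((i, j), dist i j))) []
        (fun acc x _ => PySem.List.foldl_append_singleton_eq_map _ _ _),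
      PySem.List.foldl_append_eq_flatMap]
  simp

theorem distB_eq_get_dist : distB = get_dist := by
  funext p q
  rw [distB, get_dist, PySem.List.foldl_add]
  simp

-- ===== VERDICT (by name: the statement is the Claim_ definition above) =====
theorem solve_spec : Claim_equal_solve := by
  unfold Claim_equal_solve Spec_solve
  intro coords _ _
  rw [solve, solve_alt, distB_eq_get_dist]
  have hE := dict_items_eq
    (fun i j => get_dist (PySem.List.pyGetD coords i []) (PySem.List.pyGetD coords j []))
    (PySem.List.pyRange 1 (PySem.List.len coords) 1) PySem.Dict.empty
    (PySem.List.nodup_pyRange_one 1 (PySem.List.len coords))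
    (by intro p hp; simp [PySem.Dict.empty] at hp)
  have hB := b_edges_eq
    (fun i j => get_dist (PySem.List.pyGetD coords i []) (PySem.List.pyGetD coords j []))
    (PySem.List.pyRange 1 (PySem.List.len coords) 1)
  simp only at hE hB ⊢
  rw [hE, hB, show (PySem.Dict.empty : PySem.Dict (Int × Int) Int).items = [] from rfl,
    List.nil_append]
  set n := PySem.List.len coords with hn
  set L := PySem.List.sorted
      ((PySem.List.pyRange 1 n 1).flatMap (fun j => (PySem.List.pyRange 0 j 1).map
        (fun i => ((i, j), get_dist (PySem.List.pyGetD coords i []) (PySem.List.pyGetD coords j [])))))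
      (fun x => x.2) false with hL
  by_cases hn1 : n ≤ 1
  · rw [if_pos hn1]
    have hLnil : L = [] := by
      have : PySem.List.pyRange 1 n 1 = [] := PySem.List.pyRange_one_eq_nil (by omega)
      rw [hL, this]
      have hperm := PySem.List.sorted_perm
        (([] : List Int).flatMap (fun j => (PySem.List.pyRange 0 j 1).map
          (fun i => ((i, j), get_dist (PySem.List.pyGetD coords i []) (PySem.List.pyGetD coords j [])))))
        (fun x : (Int × Int) × Int => x.2) false
      simp at hperm
      simpa using hperm
    rw [hLnil]
    rfl
  · rw [if_neg hn1]
    have hn2 : 2 ≤ n := by omega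
    have hbnd : ∀ p ∈ L, 0 ≤ p.1.1 ∧ p.1.1 < p.1.2 ∧ p.1.2 < n := by
      intro p hp
      rw [hL, PySem.List.mem_sorted] at hp
      rcases List.mem_flatMap.1 hp with ⟨j, hj, hpj⟩
      rcases List.mem_map.1 hpj with ⟨i, hi, rfl⟩
      rcases PySem.List.mem_pyRange_one.1 hj with ⟨hj1, hj2⟩
      rcases PySem.List.mem_pyRange_one.1 hi with ⟨hi1, hi2⟩
      exact ⟨hi1, hi2, hj2⟩
    have hfull : ConnE n L := by
      intro w hw0 hw1
      rcases eq_or_lt_of_le hw0 with hw | hw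
      · rw [← hw]
        exact Relation.ReflTransGen.refl
      · refine Relation.ReflTransGen.single (Or.inl ⟨get_dist (PySem.List.pyGetD coords 0 [])
          (PySem.List.pyGetD coords w []), ?_⟩)
        rw [hL, PySem.List.mem_sorted]
        refine List.mem_flatMap.2 ⟨w, PySem.List.mem_pyRange_one.2 ⟨by omega, hw1⟩, ?_⟩
        exact List.mem_map.2 ⟨0, PySem.List.mem_pyRange_one.2 ⟨le_rfl, by omega⟩, rfl⟩
    classical
    have hex : ∃ kk : Nat, ConnE n (L.take kk) := ⟨L.length, by rw [List.take_length]; exact hfull⟩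
    set k0 : Nat := Nat.find hex with hk0def
    have hk0C : ConnE n (L.take k0) := Nat.find_spec hex
    have hk0min : ∀ jj : Nat, jj < k0 → ¬ ConnE n (L.take jj) := fun jj hjj => Nat.find_min hex hjj
    have hnc0 : ¬ ConnE n (L.take 0) := by
      intro h
      have := reach_nil (h 1 (by omega) (by omega))
      omega
    have hk01 : 1 ≤ k0 := by
      rcases Nat.eq_zero_or_pos k0 with h | h
      · exact absurd (h ▸ hk0C) hnc0
      · exact h
    have hk0m : k0 ≤ L.length := Nat.find_min' hex (by rw [List.take_length]; exact hfull)
    have hA := loopA_min coords n hn2 L []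
      ((PySem.List.pyRange 0 n 1).foldl (fun r i => r.insert i (PySem.Set.ofList [i])) PySem.Dict.empty)
      k0 hbnd (init_inv n) hk01 hk0m (by simpa using hk0C) (by simpa using fun jj hjj => hk0min jj hjj)
    rw [hA]
    have hmIntNat : PySem.List.len L = (L.length : Int) := PySem.List.len_eq L
    have hconnchar : ∀ k : Int, 1 ≤ k → k ≤ (L.length : Int) →
        (connectedB L n k = true ↔ (k0 : Int) ≤ k) := by
      intro k hk1 hk2
      rw [connectedB_iff L n k hn2 (by omega) hbnd]
      constructor
      · intro h
        by_contra hcon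
        exact hk0min k.toNat (by omega) h
      · intro h
        refine conn_mono n L k0 k.toNat (by omega) hk0C
    have hbs := bsearchB_eq (connectedB L n) (k0 : Int) (L.length : Int) hconnchar
      ((L.length : Int) - 1).toNat 1 (L.length : Int) le_rfl (by omega) (by omega)
      le_rfl (by omega)
    rw [hmIntNat, hbs]
    have hidx : (k0 : Int) - 1 = ((k0 - 1 : Nat) : Int) := by omega
    have hgetB : PySem.List.pyGetD L ((k0 : Int) - 1) ((0, 0), 0) = L[k0 - 1]'(by omega) := by
      rw [PySem.List.pyGetD_eq_getElem L ((0, 0), 0) (by omega) (by omega)]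
      congr 1
      omega
    rw [hgetB, List.getElem?_eq_getElem (by omega)]
    rfl
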